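-- pv_equiv track=rewrite | github.com/KoleckOLP/koleq_brainfuck_interpreter_py | brainfuck.py | clean_brainfuck_code
-- ===== SOURCE A (Python) =====
-- def clean_brainfuck_code(dirty_code):
--     """
--     Takes in dirty brainfuck code with whitespace and comments and returns clean brainfuck
--     Only returns valid Brainfuck commands: []<>+-,.
--     """
--
--     lines = dirty_code.splitlines()
--     code_no_comments = []
--
--     for line in lines:
--         code_no_comments.append(line.split(';')[0])
--
--     allowed = "[]<>+-,."
--
--     code = ''.join(code_no_comments)
--     code = ''.join(c for c in code if c in allowed)
--     return code
-- ===== SOURCE B (Python) =====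
-- def clean_brainfuck_code(dirty_code):
--     """
--     Single linear scan with an in_comment flag instead of the
--     splitlines/split(';')/join pipeline; same output.
--     """
--     allowed = "[]<>+-,."
--     boundaries = "\n\r\v\f\x1c\x1d\x1e\x85\u2028\u2029"
--     in_comment = False
--     out = []
--     for ch in dirty_code:
--         if ch in boundaries:
--             in_comment = False
--         elif ch == ';':
--             in_comment = True
--         elif not in_comment and ch in allowed:
--             out.append(ch)
--     return ''.join(out)
-- ===== Notes on version B (the rewrite author's own statement) =====
-- stated objective: alternative
-- what changed: Replaced the splitlines/per-line split(';')[0]/join/filter pipeline (which materialises the line list and intermediate strings) by a single linear scan over the characters maintaining an in_comment flag and one output list.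
import Mathlib
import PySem

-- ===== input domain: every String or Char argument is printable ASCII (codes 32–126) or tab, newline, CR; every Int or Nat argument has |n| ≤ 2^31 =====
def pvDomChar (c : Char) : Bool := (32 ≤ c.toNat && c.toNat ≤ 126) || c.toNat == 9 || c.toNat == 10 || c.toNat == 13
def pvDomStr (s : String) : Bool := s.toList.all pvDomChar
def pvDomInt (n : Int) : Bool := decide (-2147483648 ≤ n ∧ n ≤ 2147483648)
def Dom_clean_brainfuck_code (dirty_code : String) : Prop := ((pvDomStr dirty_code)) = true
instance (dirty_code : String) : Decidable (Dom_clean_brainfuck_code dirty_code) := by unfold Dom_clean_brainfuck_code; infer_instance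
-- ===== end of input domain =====

-- B replaces A's splitlines/split(';')/join pipeline by one linear scan with an in_comment flag (objective: alternative decomposition, same output).

-- ===== PORT A =====
-- line.split(';') has a nonempty separator, so it is Chars.splitOn; the [0] index
-- always exists (split returns at least one piece), ported as List.getD 0.
-- ''.join(c for c in code if c in allowed) is String.ofList of the filtered chars;
-- 'c in allowed' (one-char substring test) is Chars.isIn [c] allowed.
def clean_brainfuck_code (dirty_code : String) : String :=
  let lines := PySem.Chars.splitlines dirty_code.toList
  let code_no_comments := lines.map (fun line => (PySem.Chars.splitOn line [';']).getD 0 [])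
  let code := PySem.Chars.join [] code_no_comments
  String.ofList (code.filter (fun c => PySem.Chars.isIn [c] "[]<>+-,.".toList))

-- ===== PORT B =====
-- B's two constants and the body of B's single loop: reset the comment flag on a
-- line boundary, set it on ';', otherwise append allowed characters.
def pvAllowed : List Char := "[]<>+-,.".toList
def pvBoundaries : List Char := ['\n', '\r', '\x0b', '\x0c', '\x1c', '\x1d', '\x1e', '\x85', '\u2028', '\u2029']

def pvStep (st : Bool × List Char) (ch : Char) : Bool × List Char :=
  if pvBoundaries.contains ch then (false, st.2)
  else if ch = ';' then (true, st.2)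
  else if !st.1 && pvAllowed.contains ch then (st.1, st.2 ++ [ch])
  else st

def clean_brainfuck_code_alt (dirty_code : String) : String :=
  String.ofList (dirty_code.toList.foldl pvStep (false, [])).2

-- ===== PRECONDITION & SPEC =====
def Spec_clean_brainfuck_code (dirty_code : String) (out : String) : Prop := out = clean_brainfuck_code_alt dirty_code
instance (dirty_code : String) (out : String) : Decidable (Spec_clean_brainfuck_code dirty_code out) := by unfold Spec_clean_brainfuck_code; infer_instance

-- ===== CLAIM (what is proved, stated in full; the proofs are below) =====
def Claim_equal_clean_brainfuck_code : Prop := ∀ (dirty_code : String), Dom_clean_brainfuck_code dirty_code → Spec_clean_brainfuck_code dirty_code (clean_brainfuck_code dirty_code)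

-- ===== LEMMAS AND PROOFS =====

-- the boundary predicate splitlines uses internally
def pvIsB (c : Char) : Bool :=
  decide (c.toNat = 10) || decide (c.toNat = 13) || decide (c.toNat = 11) || decide (c.toNat = 12) ||
    decide (c.toNat = 28) || decide (c.toNat = 29) || decide (c.toNat = 30) || decide (c.toNat = 133) ||
    decide (c.toNat = 8232) || decide (c.toNat = 8233)

lemma pvSplitlines_eq (cs : List Char) :
    PySem.Chars.splitlines cs = PySem.Chars.splitlines.go pvIsB cs [] [] := rfl

def pvP (c : Char) : Bool := PySem.Chars.isIn [c] "[]<>+-,.".toList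
def pvNS (c : Char) : Bool := !(c == ';')

-- reference recursion: what both pipelines compute
def pvClean : Bool → List Char → List Char
  | _, [] => []
  | com, c :: cs =>
    if pvIsB c then pvClean false cs
    else if c = ';' then pvClean true cs
    else if !com && pvAllowed.contains c then c :: pvClean com cs
    else pvClean com cs

def pvG (ls : List (List Char)) : List Char :=
  ((ls.map (fun l => l.takeWhile pvNS)).flatten).filter pvP

lemma pvBeq_char (c d : Char) (n : Nat) (h : d.toNat = n) : (c == d) = decide (c.toNat = n) := by
  subst h
  have h1 : (c == d) = decide (c = d) := by
    rw [Bool.eq_iff_iff]; simp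
  rw [h1, decide_eq_decide]
  constructor
  · intro hh; rw [hh]
  · intro hh; exact Char.ext (UInt32.toNat_inj.mp hh)

lemma pvBoundary_eq (c : Char) : pvBoundaries.contains c = pvIsB c := by
  simp only [pvBoundaries, List.contains_cons, List.contains_nil, pvIsB,
    pvBeq_char c '\n' 10 rfl, pvBeq_char c '\r' 13 rfl, pvBeq_char c '\x0b' 11 rfl,
    pvBeq_char c '\x0c' 12 rfl, pvBeq_char c '\x1c' 28 rfl, pvBeq_char c '\x1d' 29 rfl,
    pvBeq_char c '\x1e' 30 rfl, pvBeq_char c '\x85' 133 rfl, pvBeq_char c '\u2028' 8232 rfl,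
    pvBeq_char c '\u2029' 8233 rfl, Bool.or_false, Bool.or_assoc]

lemma pvP_eq (c : Char) : pvP c = pvAllowed.contains c := by
  rw [Bool.eq_iff_iff, pvP, PySem.Chars.isIn_iff_infix, pvAllowed, List.contains_iff_mem]
  constructor
  · intro hinf; exact hinf.mem (by simp)
  · intro hm
    obtain ⟨u, v, huv⟩ := List.mem_iff_append.mp hm
    exact ⟨u, v, by rw [huv]; simp⟩

lemma pvG_append (xs ys : List (List Char)) : pvG (xs ++ ys) = pvG xs ++ pvG ys := by
  simp [pvG]

lemma pvTakeWhile_append_not_mem (l t : List Char) (h : (';' : Char) ∉ l) :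
    (l ++ t).takeWhile pvNS = l ++ t.takeWhile pvNS := by
  induction l with
  | nil => simp
  | cons a l ih =>
    have ha : a ≠ ';' := fun hh => h (by simp [hh])
    simp only [List.cons_append, List.takeWhile_cons, pvNS]
    simp [ha, ih (fun hh => h (by simp [hh]))]

lemma pvTakeWhile_self (l : List Char) (h : (';' : Char) ∉ l) : l.takeWhile pvNS = l := by
  have := pvTakeWhile_append_not_mem l [] h
  simpa using this

lemma pvTakeWhile_append_mem (l t : List Char) (h : (';' : Char) ∈ l) :
    (l ++ t).takeWhile pvNS = l.takeWhile pvNS := by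
  induction l with
  | nil => simp at h
  | cons a l ih =>
    rcases Decidable.em (a = ';') with ha | ha
    · subst ha; simp [pvNS]
    · have hm : (';' : Char) ∈ l := by
        rcases List.mem_cons.mp h with h' | h'
        · exact absurd h'.symm ha
        · exact h'
      simp only [List.cons_append, List.takeWhile_cons, pvNS]
      simp [ha, ih hm]

-- splitOn.go prepends acc.reverse to its result
lemma pvSplitOn_go_acc (sep : List Char) :
    ∀ (fuel : Nat) (l cur : List Char) (acc : List (List Char)),
      ∃ ps, PySem.Chars.splitOn.go sep fuel l cur acc = acc.reverse ++ ps := by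
  intro fuel
  induction fuel with
  | zero => intro l cur acc; exact ⟨[cur.reverse ++ l], by rw [PySem.Chars.splitOn.go.eq_def]; simp⟩
  | succ fuel ih =>
    intro l cur acc
    cases l with
    | nil => exact ⟨[cur.reverse], by rw [PySem.Chars.splitOn.go.eq_def]; simp⟩
    | cons c rest =>
      rw [PySem.Chars.splitOn.go.eq_def]
      simp only
      split
      · obtain ⟨ps, hps⟩ := ih (List.drop sep.length (c :: rest)) [] (cur.reverse :: acc)
        exact ⟨cur.reverse :: ps, by rw [hps]; simp⟩
      · exact ih rest (c :: cur) acc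

lemma pvSplitOn_go_head :
    ∀ (fuel : Nat) (l cur : List Char), l.length ≤ fuel →
      (PySem.Chars.splitOn.go [';'] fuel l cur []).getD 0 [] = cur.reverse ++ l.takeWhile pvNS := by
  intro fuel
  induction fuel with
  | zero =>
    intro l cur h
    have : l = [] := List.length_eq_zero_iff.mp (Nat.le_zero.mp h)
    subst this
    rw [PySem.Chars.splitOn.go.eq_def]; simp
  | succ fuel ih =>
    intro l cur h
    cases l with
    | nil => rw [PySem.Chars.splitOn.go.eq_def]; simp
    | cons c rest =>
      rw [PySem.Chars.splitOn.go.eq_def]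
      simp only
      split
      · rename_i hpre
        have hc : c = ';' := by
          simp [List.isPrefixOf] at hpre
          exact hpre.symm
        obtain ⟨ps, hps⟩ :=
          pvSplitOn_go_acc [';'] fuel (List.drop [';'].length (c :: rest)) [] [cur.reverse]
        rw [hps]
        subst hc
        simp [pvNS]
      · rename_i hpre
        have hc : c ≠ ';' := by
          intro hh; subst hh
          exact hpre (by simp [List.isPrefixOf])
        have hlen : rest.length ≤ fuel := by
          simp at h; omega
        rw [ih rest (c :: cur) hlen]
        simp [pvNS, hc]

lemma pvSplitOn_head (l : List Char) :
    (PySem.Chars.splitOn l [';']).getD 0 [] = l.takeWhile pvNS := by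
  have h := pvSplitOn_go_head (l.length + 1) l [] (by omega)
  simpa [PySem.Chars.splitOn] using h

lemma pvJoin_nil (ls : List (List Char)) : PySem.Chars.join [] ls = ls.flatten := by
  simp [PySem.Chars.join]
  induction ls with
  | nil => simp [List.intercalate]
  | cons a t ih =>
    cases t with
    | nil => simp [List.intercalate]
    | cons b t2 =>
      simp only [List.intercalate] at *
      simp [List.intersperse] at *
      simpa using ih

-- one-step unfoldings of splitlines.go on a cons
lemma pvGo_rn (rest cur : List Char) (acc : List (List Char)) :
    PySem.Chars.splitlines.go pvIsB ('\x0d' :: '\n' :: rest) cur acc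
      = PySem.Chars.splitlines.go pvIsB rest [] (cur.reverse :: acc) := by
  rw [PySem.Chars.splitlines.go.eq_def]
  split
  · rename_i heq; exact absurd heq (by simp)
  · rename_i heq
    injection heq with h1 h2
    injection h2 with h2a h2b
    subst h2b; rfl
  · rename_i hg heq
    injection heq with h1 h2
    exact (hg rest h1.symm h2.symm).elim

lemma pvGo_one (c : Char) (cur : List Char) (acc : List (List Char)) :
    PySem.Chars.splitlines.go pvIsB [c] cur acc
      = if pvIsB c then PySem.Chars.splitlines.go pvIsB [] [] (cur.reverse :: acc)
        else PySem.Chars.splitlines.go pvIsB [] (c :: cur) acc := by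
  rw [PySem.Chars.splitlines.go.eq_def]
  split
  · rename_i heq; exact absurd heq (by simp)
  · rename_i heq; exact absurd heq (by simp)
  · rename_i heq
    injection heq with h1 h2
    subst h1; subst h2; rfl

lemma pvGo_two (c c2 : Char) (rest cur : List Char) (acc : List (List Char))
    (h : ¬(c = '\x0d' ∧ c2 = '\n')) :
    PySem.Chars.splitlines.go pvIsB (c :: c2 :: rest) cur acc
      = if pvIsB c then PySem.Chars.splitlines.go pvIsB (c2 :: rest) [] (cur.reverse :: acc)
        else PySem.Chars.splitlines.go pvIsB (c2 :: rest) (c :: cur) acc := by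
  rw [PySem.Chars.splitlines.go.eq_def]
  split
  · rename_i heq; exact absurd heq (by simp)
  · rename_i heq
    injection heq with h1 h2
    injection h2 with h2a h2b
    exact absurd ⟨h1, h2a⟩ h
  · rename_i heq
    injection heq with h1 h2
    subst h1; subst h2; rfl

lemma pvA_go_nil (cur : List Char) (acc : List (List Char)) :
    pvG (PySem.Chars.splitlines.go pvIsB [] cur acc)
      = pvG acc.reverse ++ (cur.reverse.takeWhile pvNS).filter pvP
          ++ pvClean (cur.contains ';') [] := by
  rw [PySem.Chars.splitlines.go.eq_def]
  simp only [pvClean]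
  rcases Decidable.em (cur = []) with hc | hc
  · subst hc; simp
  · simp [List.isEmpty_iff, hc, pvG]

-- handling of a single ordinary head character, given the invariant for the tail
lemma pvA_if (n : Nat)
    (ih : ∀ (cs cur : List Char) (acc : List (List Char)), cs.length ≤ n →
      pvG (PySem.Chars.splitlines.go pvIsB cs cur acc)
        = pvG acc.reverse ++ (cur.reverse.takeWhile pvNS).filter pvP
            ++ pvClean (cur.contains ';') cs)
    (c : Char) (R cur : List Char) (acc : List (List Char)) (hlen : R.length ≤ n) :
    pvG (if pvIsB c then PySem.Chars.splitlines.go pvIsB R [] (cur.reverse :: acc)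
          else PySem.Chars.splitlines.go pvIsB R (c :: cur) acc)
      = pvG acc.reverse ++ (cur.reverse.takeWhile pvNS).filter pvP
          ++ pvClean (cur.contains ';') (c :: R) := by
  rcases hb : pvIsB c with _ | _
  · -- ordinary (non-boundary) character
    rw [if_neg (by simp)]
    rw [ih R (c :: cur) acc hlen]
    rw [List.reverse_cons]
    rcases Decidable.em (c = ';') with hcs | hcs
    · subst hcs
      have h1 : ((';' : Char) :: cur).contains ';' = true := by
        simp
      rw [h1]
      have h2 : pvClean (cur.contains ';') (';' :: R) = pvClean true R := by
        simp [pvClean, show pvIsB ';' = false from rfl]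
      rw [h2]
      rcases Decidable.em ((';' : Char) ∈ cur) with hm | hm
      · rw [pvTakeWhile_append_mem cur.reverse [';'] (by simpa using hm)]
      · rw [pvTakeWhile_append_not_mem cur.reverse [';'] (by simpa using hm)]
        rw [pvTakeWhile_self cur.reverse (by simpa using hm)]
        simp [pvNS]
    · -- c is an ordinary non-';' character
      have hbeq : (c == (';' : Char)) = false := by
        rw [Bool.eq_iff_iff]; simp [hcs]
      have hbeq2 : ((';' : Char) == c) = false := by
        rw [Bool.eq_iff_iff]; simp
        intro hh; exact hcs hh.symm
      have h1 : (c :: cur).contains ';' = cur.contains ';' := by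
        simp only [List.contains_cons, hbeq2, Bool.false_or]
      rw [h1]
      rcases hcom : cur.contains ';' with _ | _
      · -- not in a comment
        have hm : (';' : Char) ∉ cur := by
          intro hmm
          have h9 := List.contains_iff_mem.mpr hmm
          rw [hcom] at h9
          exact Bool.false_ne_true h9
        rw [pvTakeWhile_append_not_mem cur.reverse [c] (by simpa using hm)]
        have h4 : ([c] : List Char).takeWhile pvNS = [c] := by
          simp [pvNS, hbeq]
        rw [h4, List.filter_append]
        rw [pvTakeWhile_self cur.reverse (by simpa using hm)]
        rcases hac : pvAllowed.contains c with _ | _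
        · have hmem : c ∉ pvAllowed := by
            intro hmm
            have h9 := List.contains_iff_mem.mpr hmm
            rw [hac] at h9
            exact Bool.false_ne_true h9
          have hpc : pvP c = false := by rw [pvP_eq, hac]
          have h5 : ([c] : List Char).filter pvP = [] := by simp [List.filter, hpc]
          have h7 : pvClean false (c :: R) = pvClean false R := by
            simp [pvClean, hb, hcs, hmem]
          rw [h5, h7]
          simp
        · have hmem : c ∈ pvAllowed := List.contains_iff_mem.mp hac
          have hpc : pvP c = true := by rw [pvP_eq, hac]
          have h5 : ([c] : List Char).filter pvP = [c] := by simp [List.filter, hpc]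
          have h7 : pvClean false (c :: R) = c :: pvClean false R := by
            simp [pvClean, hb, hcs, hmem]
          rw [h5, h7]
          simp [List.append_assoc]
      · -- inside a comment
        have hm : (';' : Char) ∈ cur := List.contains_iff_mem.mp hcom
        rw [pvTakeWhile_append_mem cur.reverse [c] (by simpa using hm)]
        have h2 : pvClean true (c :: R) = pvClean true R := by
          simp [pvClean, hb, hcs]
        rw [h2]
  · -- boundary character
    rw [if_pos rfl]
    rw [ih R [] (cur.reverse :: acc) hlen]
    rw [List.reverse_cons, pvG_append]
    have hbc : pvClean (cur.contains ';') (c :: R) = pvClean false R := by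
      simp [pvClean, hb]
    rw [hbc]
    simp [pvG]

-- A-side main invariant over splitlines.go
lemma pvA_go (n : Nat) :
    ∀ (cs cur : List Char) (acc : List (List Char)), cs.length ≤ n →
      pvG (PySem.Chars.splitlines.go pvIsB cs cur acc)
        = pvG acc.reverse ++ (cur.reverse.takeWhile pvNS).filter pvP
            ++ pvClean (cur.contains ';') cs := by
  induction n with
  | zero =>
    intro cs cur acc h
    have : cs = [] := List.length_eq_zero_iff.mp (Nat.le_zero.mp h)
    subst this
    exact pvA_go_nil cur acc
  | succ n ih =>
    intro cs cur acc h
    cases cs with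
    | nil => exact pvA_go_nil cur acc
    | cons c rest =>
      cases rest with
      | nil =>
        rw [pvGo_one]
        exact pvA_if n ih c [] cur acc (by simp)
      | cons c2 rest2 =>
        rcases Decidable.em (c = '\x0d' ∧ c2 = '\n') with hrn | hrn
        · obtain ⟨rfl, rfl⟩ := hrn
          rw [pvGo_rn]
          have hlen : rest2.length ≤ n := by
            simp only [List.length_cons] at h; omega
          rw [ih rest2 [] (cur.reverse :: acc) hlen]
          rw [List.reverse_cons, pvG_append]
          have hrn2 : pvClean (cur.contains ';') ('\x0d' :: '\n' :: rest2) = pvClean false rest2 := by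
            simp [pvClean, show pvIsB '\x0d' = true from rfl, show pvIsB '\n' = true from rfl]
          rw [hrn2]
          simp [pvG]
        · rw [pvGo_two c c2 rest2 cur acc hrn]
          exact pvA_if n ih c (c2 :: rest2) cur acc
            (by simp only [List.length_cons] at h ⊢; omega)

lemma pvB_fold :
    ∀ (cs : List Char) (com : Bool) (acc : List Char),
      (cs.foldl pvStep (com, acc)).2 = acc ++ pvClean com cs := by
  intro cs
  induction cs with
  | nil => intro com acc; simp [pvClean]
  | cons c rest ih =>
    intro com acc
    simp only [List.foldl_cons]
    rcases hb : pvIsB c with _ | _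
    · have hnb : c ∉ pvBoundaries := by
        intro hm
        have h2 := List.contains_iff_mem.mpr hm
        rw [pvBoundary_eq] at h2; simp [hb] at h2
      rcases Decidable.em (c = ';') with hc | hc
      · subst hc
        have hstep : pvStep (com, acc) ';' = (true, acc) := by
          simp [pvStep, hnb]
        rw [hstep, ih]
        simp [pvClean, show pvIsB ';' = false from rfl]
      · rcases Decidable.em (c ∈ pvAllowed) with ha | ha
        · rcases com with _ | _
          · have hstep : pvStep (false, acc) c = (false, acc ++ [c]) := by
              simp [pvStep, hnb, hc, ha]
            rw [hstep, ih]
            simp [pvClean, hb, hc, ha]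
          · have hstep : pvStep (true, acc) c = (true, acc) := by
              simp [pvStep, hnb, hc]
            rw [hstep, ih]
            simp [pvClean, hb, hc]
        · have hstep : pvStep (com, acc) c = (com, acc) := by
            simp [pvStep, hnb, hc, ha]
          rw [hstep, ih]
          simp [pvClean, hb, hc, ha]
    · have hmb : c ∈ pvBoundaries :=
        List.contains_iff_mem.mp (by rw [pvBoundary_eq]; exact hb)
      have hstep : pvStep (com, acc) c = (false, acc) := by
        simp [pvStep, hmb]
      rw [hstep, ih]
      simp [pvClean, hb]

-- ===== VERDICT (by name: the statement is the Claim_ definition above) =====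
theorem clean_brainfuck_code_spec : Claim_equal_clean_brainfuck_code := by
  intro s _
  unfold Spec_clean_brainfuck_code clean_brainfuck_code clean_brainfuck_code_alt
  show String.ofList
      (((PySem.Chars.join [] ((PySem.Chars.splitlines s.toList).map
          (fun line => (PySem.Chars.splitOn line [';']).getD 0 []))).filter
        (fun c => PySem.Chars.isIn [c] "[]<>+-,.".toList)))
    = String.ofList (s.toList.foldl pvStep (false, [])).2
  congr 1
  have hA : ((PySem.Chars.splitlines s.toList).map
      (fun line => (PySem.Chars.splitOn line [';']).getD 0 [])) =
      ((PySem.Chars.splitlines s.toList).map (fun l => l.takeWhile pvNS)) := by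
    apply List.map_congr_left
    intro l _
    exact pvSplitOn_head l
  rw [hA, pvJoin_nil, pvSplitlines_eq]
  have hG : (((PySem.Chars.splitlines.go pvIsB s.toList [] []).map
      (fun l => l.takeWhile pvNS)).flatten).filter
        (fun c => PySem.Chars.isIn [c] "[]<>+-,.".toList)
      = pvG (PySem.Chars.splitlines.go pvIsB s.toList [] []) := rfl
  rw [hG, pvA_go s.toList.length s.toList [] [] (le_refl _)]
  rw [pvB_fold s.toList false []]
  simp [pvG]
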